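-- pv_equiv track=rewrite | github.com/Vrishali34/Leetcode_POTD | 2493_divide_nodes_into_the_maximum_number_of_groups.py | magnificentSets
-- ===== SOURCE A (Python) =====
-- from collections import deque, defaultdict
--
-- def magnificentSets(n, edges):
--     """
--     :type n: int
--     :type edges: List[List[int]]
--     :rtype: int
--     """
--     g = [[] for _ in range(n)]
--     parent = list(range(n))
--     rank = [0] * n
--     color = [-1] * n
--
--     for u, v in edges:
--         u, v = u - 1, v - 1
--         g[u].append(v)
--         g[v].append(u)
--
--     def find(x):
--         if parent[x] != x:
--             parent[x] = find(parent[x])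
--         return parent[x]
--
--     def union(x, y):
--         rootX, rootY = find(x), find(y)
--         if rootX != rootY:
--             if rank[rootX] > rank[rootY]:
--                 parent[rootY] = rootX
--             elif rank[rootX] < rank[rootY]:
--                 parent[rootX] = rootY
--             else:
--                 parent[rootY] = rootX
--                 rank[rootX] += 1
--
--     def is_bipartite(start):
--         q = deque([start])
--         color[start] = 0
--         while q:
--             node = q.popleft()
--             for nei in g[node]:
--                 if color[nei] == -1:
--                     color[nei] = 1 - color[node]
--                     union(node, nei)
--                     q.append(nei)
--                 elif color[nei] == color[node]:
--                     return False
--         return True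
--
--     for i in range(n):
--         if color[i] == -1 and not is_bipartite(i):
--             return -1
--
--     groups = defaultdict(list)
--     for i in range(n):
--         groups[find(i)].append(i)
--
--     def bfs(src):
--         q = deque([src])
--         visited = set([src])
--         level = 0
--         while q:
--             for _ in range(len(q)):
--                 node = q.popleft()
--                 for nei in g[node]:
--                     if nei not in visited:
--                         visited.add(nei)
--                         q.append(nei)
--             level += 1
--         return level
--
--     res = 0
--     for group in groups.values():
--         res += max(bfs(node) for node in group)
--
--     return res
-- ===== SOURCE B (Python) =====
-- def magnificentSets(n, edges):
--     g = [[] for _ in range(n)]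
--     for e in edges:
--         u, v = e[0] - 1, e[1] - 1
--         g[u].append(v)
--         g[v].append(u)
--
--     comp = list(range(n))   # component label = start node of the scan that colored it
--     color = [-1] * n
--
--     for start in range(n):
--         if color[start] != -1:
--             continue
--         color[start] = 0
--         order = [start]
--         head = 0
--         while head < len(order):
--             node = order[head]
--             head += 1
--             for nei in g[node]:
--                 if color[nei] == -1:
--                     color[nei] = 1 - color[node]
--                     comp[nei] = start
--                     order.append(nei)
--                 elif color[nei] == color[node]:
--                     return -1
--
--     def levels(src):
--         frontier = [src]
--         seen = {src}
--         depth = 0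
--         while frontier:
--             nxt = []
--             for node in frontier:
--                 for nei in g[node]:
--                     if nei not in seen:
--                         seen.add(nei)
--                         nxt.append(nei)
--             frontier = nxt
--             depth += 1
--         return depth
--
--     best = {}
--     for i in range(n):
--         c = comp[i]
--         best[c] = max(best.get(c, 0), levels(i))
--     return sum(best.values())
-- ===== Notes on version B (the rewrite author's own statement) =====
-- stated objective: simpler
-- what changed: Removed the union-find (parent/rank/find/union) and the defaultdict of group lists: B labels each node with its component during a single index-pointer scan (a growing order list with a head cursor instead of a deque), and replaces the per-group list + generator max by a running-maximum dict keyed by component label; its level-count BFS iterates frontier lists instead of a counted queue.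
import Mathlib
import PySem

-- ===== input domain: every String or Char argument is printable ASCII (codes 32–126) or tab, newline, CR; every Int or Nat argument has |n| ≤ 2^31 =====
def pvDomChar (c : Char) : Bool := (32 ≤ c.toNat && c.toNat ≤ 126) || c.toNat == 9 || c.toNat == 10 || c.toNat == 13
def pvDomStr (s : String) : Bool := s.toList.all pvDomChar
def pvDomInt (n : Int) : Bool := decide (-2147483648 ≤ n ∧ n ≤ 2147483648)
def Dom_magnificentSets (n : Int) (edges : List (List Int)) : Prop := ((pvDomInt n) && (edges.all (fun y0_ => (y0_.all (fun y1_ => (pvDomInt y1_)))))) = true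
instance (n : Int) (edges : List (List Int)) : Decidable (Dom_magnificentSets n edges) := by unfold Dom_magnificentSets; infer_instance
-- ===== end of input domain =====

-- B drops A's union-find and group lists: component labels are written during an index-pointer
-- 2-coloring scan and per-component maxima kept in a running-max dict; same value, same cost.


-- ===== PORT A =====
-- g[i].append(v) on a Python list of lists
def pvAppendAt (g : List (List Int)) (i v : Int) : List (List Int) :=
  PySem.List.pySetD g i (PySem.List.pyGetD g i [] ++ [v])

-- g = [[] for _ in range(n)]; for u, v in edges: u, v = u-1, v-1; g[u].append(v); g[v].append(u)
def pvBuildA (n : Int) (edges : List (List Int)) : List (List Int) :=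
  edges.foldl (fun g e =>
    match e with
    | [u, v] => pvAppendAt (pvAppendAt g (u - 1) (v - 1)) (v - 1) (u - 1)
    | _ => g) (List.replicate n.toNat [])

-- def find(x): if parent[x] != x: parent[x] = find(parent[x]); return parent[x]   (fueled recursion)
def pvFindA : Nat → List Int → Int → List Int × Int
  | 0, parent, x => (parent, x)
  | f + 1, parent, x =>
    let px := PySem.List.pyGetD parent x 0
    if px ≠ x then
      let pr := pvFindA f parent px
      let p2 := PySem.List.pySetD pr.1 x pr.2
      (p2, PySem.List.pyGetD p2 x 0)
    else (parent, PySem.List.pyGetD parent x 0)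

-- def union(x, y): …
def pvUnionA (ff : Nat) (parent rank : List Int) (x y : Int) : List Int × List Int :=
  let r1 := pvFindA ff parent x
  let r2 := pvFindA ff r1.1 y
  if r1.2 ≠ r2.2 then
    let rx := PySem.List.pyGetD rank r1.2 0
    let ry := PySem.List.pyGetD rank r2.2 0
    if rx > ry then (PySem.List.pySetD r2.1 r2.2 r1.2, rank)
    else if rx < ry then (PySem.List.pySetD r2.1 r1.2 r2.2, rank)
    else (PySem.List.pySetD r2.1 r2.2 r1.2, PySem.List.pySetD rank r1.2 (rx + 1))
  else (r2.1, rank)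

-- inner 'for nei in g[node]' of is_bipartite; returns ((queue, parent, rank, color), keep-going?)
def pvNeisA (ff : Nat) (node : Int) :
    List Int → List Int → List Int → List Int → List Int →
    (List Int × List Int × List Int × List Int) × Bool
  | [], q, parent, rank, color => ((q, parent, rank, color), true)
  | nei :: rest, q, parent, rank, color =>
    let cN := PySem.List.pyGetD color nei 0
    if cN = -1 then
      let color' := PySem.List.pySetD color nei (1 - PySem.List.pyGetD color node 0)
      let pr := pvUnionA ff parent rank node nei
      pvNeisA ff node rest (q ++ [nei]) pr.1 pr.2 color'
    else if cN = PySem.List.pyGetD color node 0 then ((q, parent, rank, color), false)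
    else pvNeisA ff node rest q parent rank color

-- 'while q:' of is_bipartite (fueled); returns ((parent, rank, color), True/False)
def pvBipA (ff : Nat) (g : List (List Int)) :
    Nat → List Int → List Int → List Int → List Int →
    (List Int × List Int × List Int) × Bool
  | 0, _, parent, rank, color => ((parent, rank, color), true)
  | f + 1, q, parent, rank, color =>
    match q with
    | [] => ((parent, rank, color), true)
    | node :: q' =>
      let r := pvNeisA ff node (PySem.List.pyGetD g node []) q' parent rank color
      if r.2 then pvBipA ff g f r.1.1 r.1.2.1 r.1.2.2.1 r.1.2.2.2
      else ((r.1.2.1, r.1.2.2.1, r.1.2.2.2), false)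

-- for i in range(n): if color[i] == -1 and not is_bipartite(i): return -1
def pvColorAllA (ff fuel : Nat) (g : List (List Int)) :
    List Int → List Int → List Int → List Int →
    (List Int × List Int × List Int) × Bool
  | [], parent, rank, color => ((parent, rank, color), true)
  | i :: rest, parent, rank, color =>
    if PySem.List.pyGetD color i 0 = -1 then
      let r := pvBipA ff g fuel [i] parent rank (PySem.List.pySetD color i 0)
      if r.2 then pvColorAllA ff fuel g rest r.1.1 r.1.2.1 r.1.2.2
      else (r.1, false)
    else pvColorAllA ff fuel g rest parent rank color

-- groups = defaultdict(list); for i in range(n): groups[find(i)].append(i)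
def pvGroupsA (ff : Nat) :
    List Int → List Int → PySem.Dict Int (List Int) → List Int × PySem.Dict Int (List Int)
  | [], parent, d => (parent, d)
  | i :: rest, parent, d =>
    let r := pvFindA ff parent i
    pvGroupsA ff rest r.1 (PySem.Dict.modify d r.2 [] (· ++ [i]))

-- inner 'for _ in range(len(q))' of bfs
def pvBfsInnerA (g : List (List Int)) : Nat → List Int → PySem.Set Int → List Int × PySem.Set Int
  | 0, q, vis => (q, vis)
  | k + 1, q, vis =>
    match q with
    | [] => (q, vis)
    | node :: q' =>
      let r := (PySem.List.pyGetD g node []).foldl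
        (fun (acc : List Int × PySem.Set Int) nei =>
          if acc.2.contains nei then acc else (acc.1 ++ [nei], acc.2.add nei)) (q', vis)
      pvBfsInnerA g k r.1 r.2

-- 'while q: … level += 1' of bfs (fueled)
def pvBfsOuterA (g : List (List Int)) : Nat → List Int → PySem.Set Int → Int → Int
  | 0, _, _, level => level
  | f + 1, q, vis, level =>
    if q.isEmpty then level
    else
      let r := pvBfsInnerA g q.length q vis
      pvBfsOuterA g f r.1 r.2 (level + 1)

def pvBfsA (g : List (List Int)) (fuel : Nat) (src : Int) : Int :=
  pvBfsOuterA g fuel [src] (PySem.Set.ofList [src]) 0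

def magnificentSets (n : Int) (edges : List (List Int)) : Int :=
  let n' := n.toNat
  let g := pvBuildA n edges
  let r := pvColorAllA (n' + 2) (n' + 2) g (PySem.List.pyRange 0 n 1)
    (PySem.List.pyRange 0 n 1) (List.replicate n' (0 : Int)) (List.replicate n' (-1 : Int))
  if r.2 = false then -1
  else
    let gr := pvGroupsA (n' + 2) (PySem.List.pyRange 0 n 1) r.1.1 (PySem.Dict.mk [])
    gr.2.values.foldl
      (fun res grp =>
        res + (PySem.List.max? (grp.map (pvBfsA g (2 * n' + 2))) (fun x => x)).getD 0) 0

-- ===== PORT B =====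
-- for e in edges: u, v = e[0] - 1, e[1] - 1; g[u].append(v); g[v].append(u)
def pvBuildB (n : Int) (edges : List (List Int)) : List (List Int) :=
  edges.foldl (fun g e =>
    let u := PySem.List.pyGetD e 0 0 - 1
    let v := PySem.List.pyGetD e 1 0 - 1
    let g1 := PySem.List.pySetD g u (PySem.List.pyGetD g u [] ++ [v])
    PySem.List.pySetD g1 v (PySem.List.pyGetD g1 v [] ++ [u])) (List.replicate n.toNat [])

-- inner 'for nei in g[node]': grows the order list, labels, colors; none = same-color conflict
def pvPaintNeis (start node : Int) :
    List Int → List Int → List Int → List Int → Option (List Int × List Int × List Int)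
  | [], order, comp, color => some (order, comp, color)
  | nei :: rest, order, comp, color =>
    if PySem.List.pyGetD color nei 0 = -1 then
      let color' := PySem.List.pySetD color nei (1 - PySem.List.pyGetD color node 0)
      let comp' := PySem.List.pySetD comp nei start
      pvPaintNeis start node rest (order ++ [nei]) comp' color'
    else if PySem.List.pyGetD color nei 0 = PySem.List.pyGetD color node 0 then none
    else pvPaintNeis start node rest order comp color

-- while head < len(order): node = order[head]; head += 1; …   (fueled)
def pvPaintLoop (start : Int) (g : List (List Int)) :
    Nat → List Int → Int → List Int → List Int → Option (List Int × List Int)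
  | 0, _, _, comp, color => some (comp, color)
  | f + 1, order, head, comp, color =>
    if head < (order.length : Int) then
      let node := PySem.List.pyGetD order head 0
      match pvPaintNeis start node (PySem.List.pyGetD g node []) order comp color with
      | none => none
      | some (order', comp', color') => pvPaintLoop start g f order' (head + 1) comp' color'
    else some (comp, color)

-- for start in range(n): if color[start] != -1: continue; … ; none = return -1
def pvPaintAll (fuel : Nat) (g : List (List Int)) :
    List Int → List Int → List Int → Option (List Int × List Int)
  | [], comp, color => some (comp, color)
  | i :: rest, comp, color =>
    if PySem.List.pyGetD color i 0 ≠ -1 then pvPaintAll fuel g rest comp color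
    else
      match pvPaintLoop i g fuel [i] 0 comp (PySem.List.pySetD color i 0) with
      | none => none
      | some (comp', color') => pvPaintAll fuel g rest comp' color'

-- one frontier step of levels()
def pvBfsStepB (g : List (List Int)) (frontier : List Int) (vis : PySem.Set Int) :
    List Int × PySem.Set Int :=
  frontier.foldl (fun acc node =>
    (PySem.List.pyGetD g node []).foldl
      (fun (acc : List Int × PySem.Set Int) nei =>
        if acc.2.contains nei then acc else (acc.1 ++ [nei], acc.2.add nei)) acc) ([], vis)

-- 'while frontier: … depth += 1' (fueled)
def pvBfsLoopB (g : List (List Int)) : Nat → List Int → PySem.Set Int → Int → Int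
  | 0, _, _, level => level
  | f + 1, frontier, vis, level =>
    if frontier.isEmpty then level
    else
      let r := pvBfsStepB g frontier vis
      pvBfsLoopB g f r.1 r.2 (level + 1)

def pvBfsB (g : List (List Int)) (fuel : Nat) (src : Int) : Int :=
  pvBfsLoopB g fuel [src] (PySem.Set.ofList [src]) 0

def magnificentSets_alt (n : Int) (edges : List (List Int)) : Int :=
  let n' := n.toNat
  let g := pvBuildB n edges
  match pvPaintAll (n' + 2) g (PySem.List.pyRange 0 n 1)
      (PySem.List.pyRange 0 n 1) (List.replicate n' (-1 : Int)) with
  | none => -1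
  | some (comp, _color) =>
    -- best = {}; for i in range(n): c = comp[i]; best[c] = max(best.get(c, 0), levels(i))
    let best := (PySem.List.pyRange 0 n 1).foldl
      (fun (d : PySem.Dict Int Int) i =>
        let c := PySem.List.pyGetD comp i 0
        d.insert c (max (d.getD c 0) (pvBfsB g (2 * n' + 2) i))) (PySem.Dict.mk [])
    best.values.sum

-- ===== PRECONDITION & SPEC =====
-- Pre_ excludes exactly the inputs where A raises: an edge that is not a length-2 list
-- (unpacking ValueError) or an endpoint u with u-1 outside Python's index range [-n, n) (IndexError).
def Pre_magnificentSets (n : Int) (edges : List (List Int)) : Prop :=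
  ∀ e ∈ edges, e.length = 2 ∧ ∀ x ∈ e, 1 - n ≤ x ∧ x ≤ n
instance (n : Int) (edges : List (List Int)) : Decidable (Pre_magnificentSets n edges) := by
  unfold Pre_magnificentSets; infer_instance

def pvWitness_magnificentSets : Int × List (List Int) := (6, [[1, 2], [1, 4], [1, 5], [2, 6], [2, 3], [4, 6]])

def Spec_magnificentSets (n : Int) (edges : List (List Int)) (out : Int) : Prop := out = magnificentSets_alt n edges
instance (n : Int) (edges : List (List Int)) (out : Int) : Decidable (Spec_magnificentSets n edges out) := by unfold Spec_magnificentSets; infer_instance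

-- ===== CLAIM (what is proved, stated in full; the proofs are below) =====
def Claim_equal_magnificentSets : Prop := ∀ (n : Int) (edges : List (List Int)), Dom_magnificentSets n edges → Pre_magnificentSets n edges → Spec_magnificentSets n edges (magnificentSets n edges)

-- ===== LEMMAS AND PROOFS =====

-- ---- ghost specification of the coloring/grouping phase (proof-only; not part of either port):
-- A queue-based 2-coloring that writes explicit component labels, and a setdefault grouping.
-- Port A is proved equal to this ghost (union-find ≡ labels), and port B is proved equal to it too
-- (index-pointer scan ≡ queue; running-max dict ≡ grouping dict).
def pvCNeisB (start node : Int) :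
    List Int → List Int → List Int → List Int →
    (List Int × List Int × List Int) × Bool
  | [], q, comp, color => ((q, comp, color), true)
  | nei :: rest, q, comp, color =>
    let cN := PySem.List.pyGetD color nei 0
    if cN = -1 then
      let color' := PySem.List.pySetD color nei (1 - PySem.List.pyGetD color node 0)
      let comp' := PySem.List.pySetD comp nei start
      pvCNeisB start node rest (q ++ [nei]) comp' color'
    else if cN = PySem.List.pyGetD color node 0 then ((q, comp, color), false)
    else pvCNeisB start node rest q comp color

def pvCLoopB (start : Int) (g : List (List Int)) :
    Nat → List Int → List Int → List Int → (List Int × List Int) × Bool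
  | 0, _, comp, color => ((comp, color), true)
  | f + 1, q, comp, color =>
    match q with
    | [] => ((comp, color), true)
    | node :: q' =>
      let r := pvCNeisB start node (PySem.List.pyGetD g node []) q' comp color
      if r.2 then pvCLoopB start g f r.1.1 r.1.2.1 r.1.2.2
      else ((r.1.2.1, r.1.2.2), false)

def pvColorAllB (fuel : Nat) (g : List (List Int)) :
    List Int → List Int → List Int → (List Int × List Int) × Bool
  | [], comp, color => ((comp, color), true)
  | i :: rest, comp, color =>
    if PySem.List.pyGetD color i 0 = -1 then
      let r := pvCLoopB i g fuel [i] comp (PySem.List.pySetD color i 0)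
      if r.2 then pvColorAllB fuel g rest r.1.1 r.1.2
      else (r.1, false)
    else pvColorAllB fuel g rest comp color

def pvGroupsB : List Int → List Int → PySem.Dict Int (List Int) → PySem.Dict Int (List Int)
  | [], _, d => d
  | i :: rest, comp, d =>
    let k := PySem.List.pyGetD comp i 0
    pvGroupsB rest comp (d.insert k (d.getD k [] ++ [i]))

-- ---- index helpers: Python's wraparound index, its normalized slot
def pvVIdx (m : Nat) (x : Int) : Prop := -(m : Int) ≤ x ∧ x < (m : Int)

def pvNIdx (m : Nat) (x : Int) : Nat := if 0 ≤ x then x.toNat else m - (-x).toNat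

-- adjacency lists of length n' with all entries valid indices
def pvGoodG (n' : Nat) (g : List (List Int)) : Prop :=
  g.length = n' ∧ ∀ l ∈ g, ∀ x ∈ l, pvVIdx n' x

-- the joint invariant tying A's parent/rank arrays to the ghost comp array (parent = comp pointwise)
def pvInv (n' : Nat) (comp rank color : List Int) : Prop :=
  comp.length = n' ∧ rank.length = n' ∧ color.length = n' ∧
  (∀ p, p < n' → 0 ≤ comp.getD p 0 ∧ comp.getD p 0 < (n' : Int) ∧
      comp.getD (comp.getD p 0).toNat 0 = comp.getD p 0) ∧
  (∀ p, p < n' → color.getD p 0 = -1 → comp.getD p 0 = (p : Int) ∧ rank.getD p 0 = 0) ∧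
  (∀ p, p < n' → 0 ≤ rank.getD p 0) ∧
  (∀ p, p < n' → color.getD p 0 = -1 ∨ color.getD p 0 = 0 ∨ color.getD p 0 = 1) ∧
  (∀ p, p < n' → color.getD p 0 ≠ -1 → color.getD (comp.getD p 0).toNat 0 ≠ -1)

-- x is a node already absorbed by the current traversal run with start s
def pvOnRun (n' : Nat) (comp color : List Int) (s x : Int) : Prop :=
  pvVIdx n' x ∧ color.getD (pvNIdx n' x) 0 ≠ -1 ∧ comp.getD (pvNIdx n' x) 0 = s

-- s is a well-formed run start: colored, its own component label
def pvGoodS (n' : Nat) (comp color : List Int) (s : Int) : Prop :=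
  0 ≤ s ∧ s < (n' : Int) ∧ comp.getD s.toNat 0 = s ∧ color.getD s.toNat 0 ≠ -1

lemma pvNIdx_lt {m : Nat} {x : Int} (h : pvVIdx m x) : pvNIdx m x < m := by
  simp [pvVIdx] at h; simp [pvNIdx]; split_ifs <;> omega

lemma pvNIdx_nonneg {m : Nat} {x : Int} (hx : 0 ≤ x) : pvNIdx m x = x.toNat := by
  simp [pvNIdx, hx]

lemma pvGetD_valid {α : Type} (xs : List α) (x : Int) (d : α) (h : pvVIdx xs.length x) :
    PySem.List.pyGetD xs x d = xs.getD (pvNIdx xs.length x) d := by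
  simp [pvVIdx] at h
  simp [PySem.List.pyGetD, PySem.List.pyGet?, PySem.List.pyIdx?, pvNIdx]
  split_ifs <;> simp_all

lemma pvSetD_valid {α : Type} (xs : List α) (x : Int) (v : α) (h : pvVIdx xs.length x) :
    PySem.List.pySetD xs x v = xs.set (pvNIdx xs.length x) v := by
  simp [pvVIdx] at h
  simp [PySem.List.pySetD, PySem.List.pySet?, PySem.List.pyIdx?, pvNIdx]
  split_ifs <;> simp_all

lemma pvSet_getD_self {α : Type} (xs : List α) (k : Nat) (d : α) (h : k < xs.length) :
    xs.set k (xs.getD k d) = xs := by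
  apply List.ext_getElem <;> simp [List.getD_eq_getElem?_getD]
  intro i h1 h2
  rw [List.getElem_set]
  split_ifs with he
  · subst he; simp [List.getElem?_eq_getElem h]
  · rfl

lemma pvGetD_set {α : Type} (xs : List α) (k p : Nat) (v d : α) (hp : p < xs.length) :
    (xs.set k v).getD p d = if p = k then v else xs.getD p d := by
  simp [List.getD_eq_getElem?_getD]
  by_cases he : p = k
  · subst he; simp [List.getElem?_set_self (by omega : p < xs.length)]
  · simp [he, List.getElem?_set_ne (by omega : ¬ k = p)]

lemma pvNIdx_cast (m k : Nat) : pvNIdx m (k : Int) = k := by simp [pvNIdx]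

lemma pvGetD_valid' {α : Type} (xs : List α) (n' : Nat) (x : Int) (d : α)
    (hlen : xs.length = n') (h : pvVIdx n' x) :
    PySem.List.pyGetD xs x d = xs.getD (pvNIdx n' x) d := by
  subst hlen; exact pvGetD_valid xs x d h

lemma pvSetD_valid' {α : Type} (xs : List α) (n' : Nat) (x : Int) (v : α)
    (hlen : xs.length = n') (h : pvVIdx n' x) :
    PySem.List.pySetD xs x v = xs.set (pvNIdx n' x) v := by
  subst hlen; exact pvSetD_valid xs x v h

lemma pvFindA_spec (f n' : Nat) (parent : List Int) (x : Int)
    (hlen : parent.length = n') (hx : pvVIdx n' x)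
    (hfix : ∀ p, p < n' → 0 ≤ parent.getD p 0 ∧ parent.getD p 0 < (n' : Int) ∧
      parent.getD (parent.getD p 0).toNat 0 = parent.getD p 0) :
    pvFindA (f + 2) parent x = (parent, parent.getD (pvNIdx n' x) 0) := by
  subst hlen
  have hk := pvNIdx_lt hx
  obtain ⟨hc0, hc1, hcfix⟩ := hfix _ hk
  have hread : PySem.List.pyGetD parent x 0 = parent.getD (pvNIdx parent.length x) 0 :=
    pvGetD_valid parent x 0 hx
  have hcv : pvVIdx parent.length (parent.getD (pvNIdx parent.length x) 0) := ⟨by omega, hc1⟩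
  have hreadc : PySem.List.pyGetD parent (parent.getD (pvNIdx parent.length x) 0) 0
      = parent.getD (pvNIdx parent.length x) 0 := by
    rw [pvGetD_valid parent _ 0 hcv, pvNIdx_nonneg hc0]; exact hcfix
  by_cases hcx : parent.getD (pvNIdx parent.length x) 0 = x
  · simp only [pvFindA]
    rw [hread, if_neg (not_not_intro hcx)]
  · have hset : PySem.List.pySetD parent x (parent.getD (pvNIdx parent.length x) 0) = parent := by
      rw [pvSetD_valid parent x _ hx, pvSet_getD_self _ _ _ hk]
    simp only [pvFindA]
    rw [hread]
    rw [if_pos hcx]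
    rw [hreadc]
    rw [if_neg (by simp)]
    dsimp only
    rw [hset, hread]

lemma pvUnionA_spec (f n' : Nat) (comp rank color : List Int) (s node nei : Int)
    (hinv : pvInv n' comp rank color) (hs : pvGoodS n' comp color s)
    (hnode : pvOnRun n' comp color s node)
    (hnei : pvVIdx n' nei) (hneiF : color.getD (pvNIdx n' nei) 0 = -1) :
    ∃ rank', pvUnionA (f + 2) comp rank node nei = (comp.set (pvNIdx n' nei) s, rank') ∧
      rank'.length = n' ∧ (∀ p, p < n' → 0 ≤ rank'.getD p 0) ∧
      (∀ p, p < n' → p ≠ s.toNat → rank'.getD p 0 = rank.getD p 0) := by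
  obtain ⟨hclen, hrlen, hcollen, hfix, hunc, hrk0, htri, hcroot⟩ := hinv
  obtain ⟨hs0, hs1, hsfix, hscol⟩ := hs
  obtain ⟨hnv, hncol, hncomp⟩ := hnode
  have hknei := pvNIdx_lt hnei
  obtain ⟨huncc, huncr⟩ := hunc _ hknei hneiF
  have hstn : s.toNat < n' := by omega
  have hsne : s ≠ ((pvNIdx n' nei : Nat) : Int) := by
    intro h
    have hh : s.toNat = pvNIdx n' nei := by omega
    rw [hh] at hscol
    exact hscol hneiF
  have hfind1 := pvFindA_spec f n' comp node hclen hnv hfix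
  have hfind2 := pvFindA_spec f n' comp nei hclen hnei hfix
  have hsv : pvVIdx n' s := ⟨by omega, hs1⟩
  have hkv : pvVIdx n' ((pvNIdx n' nei : Nat) : Int) := ⟨by omega, by exact_mod_cast hknei⟩
  have hrread_s : PySem.List.pyGetD rank s 0 = rank.getD s.toNat 0 := by
    rw [pvGetD_valid' rank n' s 0 hrlen hsv, pvNIdx_nonneg hs0]
  have hrread_k : PySem.List.pyGetD rank ((pvNIdx n' nei : Nat) : Int) 0
      = rank.getD (pvNIdx n' nei) 0 := by
    rw [pvGetD_valid' rank n' _ 0 hrlen hkv, pvNIdx_cast]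
  have hsetk : PySem.List.pySetD comp ((pvNIdx n' nei : Nat) : Int) s
      = comp.set (pvNIdx n' nei) s := by
    rw [pvSetD_valid' comp n' _ s hclen hkv, pvNIdx_cast]
  simp only [pvUnionA]
  rw [hfind1]
  dsimp only
  rw [hncomp, hfind2]
  dsimp only
  rw [huncc]
  rw [if_pos hsne]
  rw [hrread_s, hrread_k, huncr]
  by_cases hrx : 0 < rank.getD s.toNat 0
  · rw [if_pos hrx, hsetk]
    exact ⟨rank, rfl, hrlen, hrk0, fun p hp hne => rfl⟩
  · have hrx0 : rank.getD s.toNat 0 = 0 := by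
      have := hrk0 _ hstn
      omega
    rw [if_neg hrx, if_neg (by omega), hsetk]
    refine ⟨rank.set s.toNat (rank.getD s.toNat 0 + 1), ?_, ?_, ?_, ?_⟩
    · rw [pvSetD_valid' rank n' s _ hrlen hsv, pvNIdx_nonneg hs0]
    · simp [hrlen]
    · intro p hp
      rw [pvGetD_set rank s.toNat p _ 0 (by omega)]
      split_ifs with he
      · omega
      · exact hrk0 p hp
    · intro p hp hne
      rw [pvGetD_set rank s.toNat p _ 0 (by omega)]
      simp [hne]

lemma pvNeis_spec (f n' : Nat) (s : Int) :
    ∀ (neis : List Int) (node : Int) (q comp rank color : List Int),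
    pvInv n' comp rank color → pvGoodS n' comp color s →
    pvOnRun n' comp color s node → (∀ x ∈ q, pvOnRun n' comp color s x) →
    (∀ x ∈ neis, pvVIdx n' x) →
    ∀ q2 comp2 color2 flag,
      pvCNeisB s node neis q comp color = ((q2, comp2, color2), flag) →
      ∃ rank', pvNeisA (f + 2) node neis q comp rank color = ((q2, comp2, rank', color2), flag) ∧
        (flag = true → pvInv n' comp2 rank' color2 ∧ pvGoodS n' comp2 color2 s ∧
          ∀ x ∈ q2, pvOnRun n' comp2 color2 s x) := by
  intro neis
  induction neis with
  | nil =>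
    intro node q comp rank color hinv hs hnode hq hneis q2 comp2 color2 flag hB
    simp only [pvCNeisB, Prod.mk.injEq] at hB
    obtain ⟨⟨rfl, rfl, rfl⟩, rfl⟩ := hB
    exact ⟨rank, rfl, fun _ => ⟨hinv, hs, hq⟩⟩
  | cons nei rest ih =>
    intro node q comp rank color hinv hs hnode hq hneis q2 comp2 color2 flag hB
    obtain ⟨hclen, hrlen, hcollen, hfix, hunc, hrk0, htri, hcroot⟩ := hinv
    obtain ⟨hs0, hs1, hsfix, hscol⟩ := hs
    obtain ⟨hnv, hncol, hncomp⟩ := hnode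
    have hneiv : pvVIdx n' nei := hneis nei (List.mem_cons_self ..)
    have hrestv : ∀ x ∈ rest, pvVIdx n' x := fun x hx => hneis x (List.mem_cons_of_mem _ hx)
    have hknei := pvNIdx_lt hneiv
    have hknode := pvNIdx_lt hnv
    have hstn : s.toNat < n' := by omega
    have hcolread : PySem.List.pyGetD color nei 0 = color.getD (pvNIdx n' nei) 0 :=
      pvGetD_valid' color n' nei 0 hcollen hneiv
    have hnoderead : PySem.List.pyGetD color node 0 = color.getD (pvNIdx n' node) 0 :=
      pvGetD_valid' color n' node 0 hcollen hnv
    simp only [pvCNeisB] at hB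
    simp only [pvNeisA]
    rw [hcolread] at hB ⊢
    by_cases hfresh : color.getD (pvNIdx n' nei) 0 = -1
    · rw [if_pos hfresh] at hB ⊢
      rw [hnoderead] at hB ⊢
      have hc01 : color.getD (pvNIdx n' node) 0 = 0 ∨ color.getD (pvNIdx n' node) 0 = 1 := by
        rcases htri _ hknode with h | h | h
        · exact absurd h hncol
        · exact Or.inl h
        · exact Or.inr h
      have hksn : pvNIdx n' nei ≠ s.toNat := by
        intro h; rw [h] at hfresh; exact hscol hfresh
      have hkn : pvNIdx n' nei ≠ pvNIdx n' node := by
        intro h; rw [h] at hfresh; exact hncol hfresh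
      have hcolw : PySem.List.pySetD color nei (1 - color.getD (pvNIdx n' node) 0)
          = color.set (pvNIdx n' nei) (1 - color.getD (pvNIdx n' node) 0) :=
        pvSetD_valid' color n' nei _ hcollen hneiv
      have hcompw : PySem.List.pySetD comp nei s = comp.set (pvNIdx n' nei) s :=
        pvSetD_valid' comp n' nei s hclen hneiv
      rw [hcolw] at hB ⊢
      rw [hcompw] at hB
      obtain ⟨rank1, hun, hr1len, hr1pos, hr1same⟩ :=
        pvUnionA_spec f n' comp rank color s node nei
          ⟨hclen, hrlen, hcollen, hfix, hunc, hrk0, htri, hcroot⟩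
          ⟨hs0, hs1, hsfix, hscol⟩ ⟨hnv, hncol, hncomp⟩ hneiv hfresh
      rw [hun]
      dsimp only
      -- facts about the updated state
      have hgetc : ∀ p, p < n' → (comp.set (pvNIdx n' nei) s).getD p 0
          = if p = pvNIdx n' nei then s else comp.getD p 0 := by
        intro p hp
        exact pvGetD_set comp (pvNIdx n' nei) p s 0 (by omega)
      have hgetl : ∀ p, p < n' →
          (color.set (pvNIdx n' nei) (1 - color.getD (pvNIdx n' node) 0)).getD p 0
          = if p = pvNIdx n' nei then 1 - color.getD (pvNIdx n' node) 0 else color.getD p 0 := by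
        intro p hp
        exact pvGetD_set color (pvNIdx n' nei) p _ 0 (by omega)
      have huncck : comp.getD (pvNIdx n' nei) 0 = ((pvNIdx n' nei : Nat) : Int) :=
        (hunc _ hknei hfresh).1
      have hnewcol : (1 : Int) - color.getD (pvNIdx n' node) 0 ≠ -1 := by
        rcases hc01 with h | h <;> rw [h] <;> decide
      have hinv' : pvInv n' (comp.set (pvNIdx n' nei) s) rank1
          (color.set (pvNIdx n' nei) (1 - color.getD (pvNIdx n' node) 0)) := by
        refine ⟨by simp [hclen], hr1len, by simp [hcollen], ?_, ?_, hr1pos, ?_, ?_⟩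
        · intro p hp
          rw [hgetc p hp]
          split_ifs with he
          · refine ⟨by omega, by omega, ?_⟩
            rw [hgetc _ hstn, if_neg (Ne.symm hksn) ]
            exact hsfix
          · obtain ⟨h0, h1, hfp⟩ := hfix p hp
            refine ⟨h0, h1, ?_⟩
            have hct : (comp.getD p 0).toNat ≠ pvNIdx n' nei := by
              intro hcontra
              by_cases hpcol : color.getD p 0 = -1
              · have := (hunc p hp hpcol).1
                omega
              · have := hcroot p hp hpcol
                rw [hcontra] at this
                exact this hfresh
            rw [hgetc _ (by omega), if_neg hct]
            exact hfp
        · intro p hp hpc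
          rw [hgetl p hp] at hpc
          by_cases he : p = pvNIdx n' nei
          · rw [if_pos he] at hpc; exact absurd hpc hnewcol
          · rw [if_neg he] at hpc
            obtain ⟨h1, h2⟩ := hunc p hp hpc
            refine ⟨?_, ?_⟩
            · rw [hgetc p hp, if_neg he]; exact h1
            · rw [hr1same p hp ?_, h2]
              intro hcontra
              rw [hcontra] at hpc
              exact hscol hpc
        · intro p hp
          rw [hgetl p hp]
          split_ifs with he
          · rcases hc01 with h | h <;> rw [h] <;> norm_num
          · exact htri p hp
        · intro p hp hpc
          rw [hgetl p hp] at hpc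
          rw [hgetc p hp]
          by_cases he : p = pvNIdx n' nei
          · rw [if_pos he]
            rw [hgetl _ hstn, if_neg (Ne.symm hksn)]
            exact hscol
          · rw [if_neg he] at hpc
            rw [if_neg he]
            have hrt := hcroot p hp hpc
            have hct : (comp.getD p 0).toNat ≠ pvNIdx n' nei := by
              intro hcontra
              rw [hcontra] at hrt
              exact hrt hfresh
            rw [hgetl _ (by
              obtain ⟨h0, h1, _⟩ := hfix p hp
              omega), if_neg hct]
            exact hrt
      have hs' : pvGoodS n' (comp.set (pvNIdx n' nei) s)
          (color.set (pvNIdx n' nei) (1 - color.getD (pvNIdx n' node) 0)) s := by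
        refine ⟨hs0, hs1, ?_, ?_⟩
        · rw [hgetc _ hstn, if_neg (Ne.symm hksn)]; exact hsfix
        · rw [hgetl _ hstn, if_neg (Ne.symm hksn)]; exact hscol
      have hnode' : pvOnRun n' (comp.set (pvNIdx n' nei) s)
          (color.set (pvNIdx n' nei) (1 - color.getD (pvNIdx n' node) 0)) s node := by
        refine ⟨hnv, ?_, ?_⟩
        · rw [hgetl _ hknode, if_neg (Ne.symm hkn)]; exact hncol
        · rw [hgetc _ hknode, if_neg (Ne.symm hkn)]; exact hncomp
      have hq' : ∀ x ∈ q ++ [nei], pvOnRun n' (comp.set (pvNIdx n' nei) s)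
          (color.set (pvNIdx n' nei) (1 - color.getD (pvNIdx n' node) 0)) s x := by
        intro x hx
        rcases List.mem_append.1 hx with hx | hx
        · obtain ⟨hxv, hxc, hxcomp⟩ := hq x hx
          have hxk := pvNIdx_lt hxv
          have hne : pvNIdx n' x ≠ pvNIdx n' nei := by
            intro hcontra; rw [hcontra] at hxc; exact hxc hfresh
          refine ⟨hxv, ?_, ?_⟩
          · rw [hgetl _ hxk, if_neg hne]; exact hxc
          · rw [hgetc _ hxk, if_neg hne]; exact hxcomp
        · simp at hx; subst hx
          refine ⟨hneiv, ?_, ?_⟩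
          · rw [hgetl _ hknei, if_pos rfl]; exact hnewcol
          · rw [hgetc _ hknei, if_pos rfl]
      exact ih node (q ++ [nei]) _ rank1 _ hinv' hs' hnode' hq' hrestv q2 comp2 color2 flag hB
    · rw [if_neg hfresh] at hB ⊢
      rw [hnoderead] at hB ⊢
      by_cases hconf : color.getD (pvNIdx n' nei) 0 = color.getD (pvNIdx n' node) 0
      · rw [if_pos hconf] at hB ⊢
        simp only [Prod.mk.injEq] at hB
        obtain ⟨⟨rfl, rfl, rfl⟩, rfl⟩ := hB
        exact ⟨rank, rfl, by simp⟩
      · rw [if_neg hconf] at hB ⊢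
        exact ih node q comp rank color
          ⟨hclen, hrlen, hcollen, hfix, hunc, hrk0, htri, hcroot⟩
          ⟨hs0, hs1, hsfix, hscol⟩ ⟨hnv, hncol, hncomp⟩ hq hrestv q2 comp2 color2 flag hB

lemma pvBip_spec (f2 n' : Nat) (g : List (List Int)) (hg : pvGoodG n' g) (s : Int) :
    ∀ (fuel : Nat) (q comp rank color : List Int),
    pvInv n' comp rank color → pvGoodS n' comp color s →
    (∀ x ∈ q, pvOnRun n' comp color s x) →
    ∀ comp2 color2 flag,
      pvCLoopB s g fuel q comp color = ((comp2, color2), flag) →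
      ∃ rank', pvBipA (f2 + 2) g fuel q comp rank color = ((comp2, rank', color2), flag) ∧
        (flag = true → pvInv n' comp2 rank' color2) := by
  intro fuel
  induction fuel with
  | zero =>
    intro q comp rank color hinv hs hq comp2 color2 flag hB
    simp only [pvCLoopB, Prod.mk.injEq] at hB
    obtain ⟨⟨rfl, rfl⟩, rfl⟩ := hB
    exact ⟨rank, rfl, fun _ => hinv⟩
  | succ fl ih =>
    intro q comp rank color hinv hs hq comp2 color2 flag hB
    cases q with
    | nil =>
      simp only [pvCLoopB] at hB
      simp only [Prod.mk.injEq] at hB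
      obtain ⟨⟨rfl, rfl⟩, rfl⟩ := hB
      simp only [pvBipA]
      exact ⟨rank, rfl, fun _ => hinv⟩
    | cons node q' =>
      simp only [pvCLoopB] at hB
      simp only [pvBipA]
      have hnodeOn := hq node (List.mem_cons_self ..)
      have hneis : ∀ x ∈ PySem.List.pyGetD g node [], pvVIdx n' x := by
        intro x hx
        rw [pvGetD_valid' g n' node [] hg.1 hnodeOn.1] at hx
        have hk := pvNIdx_lt hnodeOn.1
        have hmem : g.getD (pvNIdx n' node) [] ∈ g := by
          rw [List.getD_eq_getElem?_getD, List.getElem?_eq_getElem (by rw [hg.1]; exact hk)]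
          exact List.getElem_mem _
        exact hg.2 _ hmem x hx
      rcases hcb : pvCNeisB s node (PySem.List.pyGetD g node []) q' comp color
        with ⟨⟨qq, cc, ll⟩, flag2⟩
      obtain ⟨rank1, hA, hcons⟩ := pvNeis_spec f2 n' s (PySem.List.pyGetD g node []) node q'
        comp rank color hinv hs hnodeOn (fun x hx => hq x (List.mem_cons_of_mem _ hx))
        hneis qq cc ll flag2 hcb
      rw [hcb] at hB
      rw [hA]
      dsimp only at hB ⊢
      cases flag2 with
      | false =>
        simp only [Bool.false_eq_true, if_false, Prod.mk.injEq] at hB ⊢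
        obtain ⟨⟨rfl, rfl⟩, rfl⟩ := hB
        exact ⟨rank1, by simp, by simp⟩
      | true =>
        obtain ⟨hinv1, hs1, hq1⟩ := hcons rfl
        simp only [if_true] at hB ⊢
        exact ih qq cc rank1 ll hinv1 hs1 hq1 comp2 color2 flag hB

lemma pvColorAll_spec (f2 fuel n' : Nat) (g : List (List Int)) (hg : pvGoodG n' g) :
    ∀ (is : List Int) (comp rank color : List Int),
    (∀ i ∈ is, 0 ≤ i ∧ i < (n' : Int)) → pvInv n' comp rank color →
    ∀ comp2 color2 flag,
      pvColorAllB fuel g is comp color = ((comp2, color2), flag) →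
      ∃ rank', pvColorAllA (f2 + 2) fuel g is comp rank color = ((comp2, rank', color2), flag) ∧
        (flag = true → pvInv n' comp2 rank' color2) := by
  intro is
  induction is with
  | nil =>
    intro comp rank color his hinv comp2 color2 flag hB
    simp only [pvColorAllB, Prod.mk.injEq] at hB
    obtain ⟨⟨rfl, rfl⟩, rfl⟩ := hB
    exact ⟨rank, rfl, fun _ => hinv⟩
  | cons i rest ih =>
    intro comp rank color his hinv comp2 color2 flag hB
    obtain ⟨hi0, hi1⟩ := his i (List.mem_cons_self ..)
    have hrest : ∀ j ∈ rest, 0 ≤ j ∧ j < (n' : Int) :=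
      fun j hj => his j (List.mem_cons_of_mem _ hj)
    obtain ⟨hclen, hrlen, hcollen, hfix, hunc, hrk0, htri, hcroot⟩ := hinv
    have hiv : pvVIdx n' i := ⟨by omega, hi1⟩
    have hitn : i.toNat < n' := by omega
    have hread : PySem.List.pyGetD color i 0 = color.getD i.toNat 0 := by
      rw [pvGetD_valid' color n' i 0 hcollen hiv, pvNIdx_nonneg hi0]
    simp only [pvColorAllB] at hB
    simp only [pvColorAllA]
    rw [hread] at hB ⊢
    by_cases hcol : color.getD i.toNat 0 = -1
    · rw [if_pos hcol] at hB ⊢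
      have hsetc : PySem.List.pySetD color i 0 = color.set i.toNat 0 := by
        rw [pvSetD_valid' color n' i 0 hcollen hiv, pvNIdx_nonneg hi0]
      rw [hsetc] at hB ⊢
      have hgetl : ∀ p, p < n' → (color.set i.toNat (0 : Int)).getD p 0
          = if p = i.toNat then 0 else color.getD p 0 := by
        intro p hp
        exact pvGetD_set color i.toNat p 0 0 (by omega)
      have hcompi : comp.getD i.toNat 0 = i := by
        rw [(hunc _ hitn hcol).1]
        omega
      have hinv' : pvInv n' comp rank (color.set i.toNat 0) := by
        refine ⟨hclen, hrlen, by simp [hcollen], hfix, ?_, hrk0, ?_, ?_⟩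
        · intro p hp hpc
          rw [hgetl p hp] at hpc
          by_cases he : p = i.toNat
          · rw [if_pos he] at hpc; exact absurd hpc (by decide)
          · rw [if_neg he] at hpc
            exact hunc p hp hpc
        · intro p hp
          rw [hgetl p hp]
          split_ifs with he
          · right; left; rfl
          · exact htri p hp
        · intro p hp hpc
          have hbnd : (comp.getD p 0).toNat < n' := by
            obtain ⟨h0, h1, _⟩ := hfix p hp
            omega
          rw [hgetl _ hbnd]
          by_cases he : p = i.toNat
          · subst he
            rw [hcompi]
            simp
          · rw [hgetl p hp, if_neg he] at hpc
            split_ifs with he2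
            · simp
            · exact hcroot p hp hpc
      have hs' : pvGoodS n' comp (color.set i.toNat 0) i := by
        refine ⟨hi0, hi1, hcompi, ?_⟩
        rw [hgetl _ hitn, if_pos rfl]
        decide
      have hq' : ∀ x ∈ [i], pvOnRun n' comp (color.set i.toNat 0) i x := by
        intro x hx
        simp at hx; subst hx
        refine ⟨hiv, ?_, ?_⟩
        · rw [pvNIdx_nonneg hi0, hgetl _ hitn, if_pos rfl]; decide
        · rw [pvNIdx_nonneg hi0]; exact hcompi
      rcases hcb : pvCLoopB i g fuel [i] comp (color.set i.toNat 0) with ⟨⟨cc, ll⟩, flag2⟩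
      obtain ⟨rank1, hA, hcons⟩ := pvBip_spec f2 n' g hg i fuel [i] comp rank
        (color.set i.toNat 0) hinv' hs' hq' cc ll flag2 hcb
      rw [hcb] at hB
      rw [hA]
      dsimp only at hB ⊢
      cases flag2 with
      | false =>
        simp only [Bool.false_eq_true, if_false, Prod.mk.injEq] at hB ⊢
        obtain ⟨⟨rfl, rfl⟩, rfl⟩ := hB
        exact ⟨rank1, by simp, by simp⟩
      | true =>
        have hinv1 := hcons rfl
        simp only [if_true] at hB ⊢
        exact ih cc rank1 ll hrest hinv1 comp2 color2 flag hB
    · rw [if_neg hcol] at hB ⊢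
      exact ih comp rank color hrest
        ⟨hclen, hrlen, hcollen, hfix, hunc, hrk0, htri, hcroot⟩ comp2 color2 flag hB

lemma pvGroups_spec (f2 n' : Nat) :
    ∀ (is : List Int) (comp : List Int) (d : PySem.Dict Int (List Int)),
    comp.length = n' → (∀ i ∈ is, 0 ≤ i ∧ i < (n' : Int)) →
    (∀ p, p < n' → 0 ≤ comp.getD p 0 ∧ comp.getD p 0 < (n' : Int) ∧
      comp.getD (comp.getD p 0).toNat 0 = comp.getD p 0) →
    pvGroupsA (f2 + 2) is comp d = (comp, pvGroupsB is comp d) := by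
  intro is comp d hlen his hfix
  induction is generalizing d with
  | nil => simp [pvGroupsA, pvGroupsB]
  | cons i rest ih =>
    obtain ⟨hi0, hi1⟩ := his i (List.mem_cons_self ..)
    have hiv : pvVIdx n' i := ⟨by omega, hi1⟩
    have hfind := pvFindA_spec f2 n' comp i hlen hiv hfix
    have hkey : PySem.List.pyGetD comp i 0 = comp.getD (pvNIdx n' i) 0 := by
      rw [pvGetD_valid comp i 0 (hlen ▸ hiv), hlen]
    simp only [pvGroupsA, pvGroupsB, hfind, hkey, PySem.Dict.modify]
    exact ih _ (fun j hj => his j (List.mem_cons_of_mem _ hj))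

-- ---- lockstep: B's index-pointer scan ≡ the ghost queue scan
lemma pvPaintNeis_ghost (s node : Int) :
    ∀ (neis pre q comp color : List Int),
    pvPaintNeis s node neis (pre ++ q) comp color
      = (match pvCNeisB s node neis q comp color with
         | ((q2, c2, l2), true) => some (pre ++ q2, c2, l2)
         | (_, false) => none) := by
  intro neis
  induction neis with
  | nil => intro pre q comp color; simp [pvPaintNeis, pvCNeisB]
  | cons nei rest ih =>
    intro pre q comp color
    simp only [pvPaintNeis, pvCNeisB]
    by_cases h1 : PySem.List.pyGetD color nei 0 = -1
    · rw [if_pos h1, if_pos h1]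
      rw [List.append_assoc]
      exact ih pre (q ++ [nei]) _ _
    · rw [if_neg h1, if_neg h1]
      by_cases h2 : PySem.List.pyGetD color nei 0 = PySem.List.pyGetD color node 0
      · rw [if_pos h2, if_pos h2]
      · rw [if_neg h2, if_neg h2]
        exact ih pre q comp color

lemma pvPaintLoop_ghost (s : Int) (g : List (List Int)) :
    ∀ (f : Nat) (pre q comp color : List Int),
    pvPaintLoop s g f (pre ++ q) (pre.length : Int) comp color
      = (match pvCLoopB s g f q comp color with
         | ((c2, l2), true) => some (c2, l2)
         | (_, false) => none) := by
  intro f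
  induction f with
  | zero => intro pre q comp color; simp [pvPaintLoop, pvCLoopB]
  | succ fl ih =>
    intro pre q comp color
    simp only [pvPaintLoop, pvCLoopB]
    cases q with
    | nil =>
      rw [if_neg (by simp)]
    | cons node q' =>
      dsimp only
      have hlt : (pre.length : Int) < (((pre ++ node :: q').length : Nat) : Int) := by
        push_cast [List.length_append, List.length_cons]
        omega
      rw [if_pos hlt]
      have hnode : PySem.List.pyGetD (pre ++ node :: q') (pre.length : Int) 0 = node := by
        rw [PySem.List.pyGetD_natCast, List.getD_eq_getElem?_getD,
          List.getElem?_append_right (le_refl pre.length)]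
        simp
      rw [hnode]
      rcases hcb : pvCNeisB s node (PySem.List.pyGetD g node []) q' comp color
        with ⟨⟨q2, c2, l2⟩, flag2⟩
      have hsplit : pre ++ node :: q' = (pre ++ [node]) ++ q' := by simp
      rw [hsplit, pvPaintNeis_ghost s node (PySem.List.pyGetD g node []) (pre ++ [node]) q', hcb]
      cases flag2 with
      | false => rfl
      | true =>
        dsimp only
        simp only [if_true]
        have hlen : (pre.length : Int) + 1 = (((pre ++ [node]).length : Nat) : Int) := by
          simp
        rw [hlen]
        exact ih (pre ++ [node]) q2 c2 l2

lemma pvPaintAll_ghost (fuel : Nat) (g : List (List Int)) :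
    ∀ (is comp color : List Int),
    pvPaintAll fuel g is comp color
      = (match pvColorAllB fuel g is comp color with
         | ((c2, l2), true) => some (c2, l2)
         | (_, false) => none) := by
  intro is
  induction is with
  | nil => intro comp color; simp [pvPaintAll, pvColorAllB]
  | cons i rest ih =>
    intro comp color
    simp only [pvPaintAll, pvColorAllB]
    by_cases h1 : PySem.List.pyGetD color i 0 = -1
    · rw [if_neg (by simp [h1]), if_pos h1]
      have hgl := pvPaintLoop_ghost i g fuel [] [i] comp (PySem.List.pySetD color i 0)
      simp only [List.nil_append, List.length_nil, Nat.cast_zero] at hgl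
      rw [hgl]
      rcases hcb : pvCLoopB i g fuel [i] comp (PySem.List.pySetD color i 0)
        with ⟨⟨c2, l2⟩, flag2⟩
      cases flag2 with
      | false => rfl
      | true =>
        dsimp only
        simp only [if_true]
        exact ih c2 l2
    · rw [if_pos (by simp [h1]), if_neg h1]
      exact ih comp color

-- ---- the grouping dict vs the running-max dict
lemma pvGroupsB_as_fold :
    ∀ (is comp : List Int) (d : PySem.Dict Int (List Int)),
    pvGroupsB is comp d
      = (is.map (fun i => (PySem.List.pyGetD comp i 0, i))).foldl
          (fun d p => d.modify p.1 [] (· ++ [p.2])) d := by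
  intro is
  induction is with
  | nil => intro comp d; simp [pvGroupsB]
  | cons i rest ih =>
    intro comp d
    simp only [pvGroupsB, List.map_cons, List.foldl_cons]
    rw [ih comp]
    rfl

lemma pvGetD_foldl_modify_max :
    ∀ (l : List (Int × Int)) (d : PySem.Dict Int Int) (c : Int),
    (l.foldl (fun d p => d.modify p.1 0 (fun o => max o p.2)) d).getD c 0
      = ((l.filter (fun p => p.1 == c)).map (·.2)).foldl max (d.getD c 0) := by
  intro l
  induction l with
  | nil => intro d c; simp
  | cons p rest ih =>
    intro d c
    simp only [List.foldl_cons]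
    rw [ih]
    by_cases he : p.1 = c
    · rw [List.filter_cons_of_pos (by simp [he])]
      simp only [List.map_cons, List.foldl_cons]
      rw [PySem.Dict.getD_modify, if_pos he.symm, he]
    · rw [List.filter_cons_of_neg (by simp [he])]
      rw [PySem.Dict.getD_modify, if_neg (fun h => he h.symm)]

-- level ≤ result of the fueled level loop
lemma pvBfsLoopB_le (g : List (List Int)) :
    ∀ (f : Nat) (fr : List Int) (vis : PySem.Set Int) (lvl : Int),
    lvl ≤ pvBfsLoopB g f fr vis lvl := by
  intro f
  induction f with
  | zero => intro fr vis lvl; simp [pvBfsLoopB]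
  | succ fl ih =>
    intro fr vis lvl
    simp only [pvBfsLoopB]
    by_cases h : fr.isEmpty
    · simp [h]
    · simp only [h]
      exact le_trans (by omega) (ih _ _ (lvl + 1))

lemma one_le_pvBfsB (g : List (List Int)) (fuel : Nat) (src : Int) (h : 1 ≤ fuel) :
    1 ≤ pvBfsB g fuel src := by
  cases fuel with
  | zero => omega
  | succ f =>
    simp only [pvBfsB, pvBfsLoopB, List.isEmpty_cons, Bool.false_eq_true, if_false]
    exact pvBfsLoopB_le g f _ _ 1

-- the per-component max over the group list equals the running-max dict entry
lemma pvFinal_sum (g : List (List Int)) (fu : Nat) (hfu : 1 ≤ fu) (is comp : List Int) :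
    (pvGroupsB is comp (PySem.Dict.mk [])).values.foldl
        (fun res grp =>
          res + (PySem.List.max? (grp.map (pvBfsB g fu)) (fun x => x)).getD 0) 0
      = ((is.foldl
          (fun (d : PySem.Dict Int Int) i =>
            let c := PySem.List.pyGetD comp i 0
            d.insert c (max (d.getD c 0) (pvBfsB g fu i))) (PySem.Dict.mk [])).values).sum := by
  have hmkempty : (PySem.Dict.mk [] : PySem.Dict Int (List Int)) = PySem.Dict.empty := rfl
  have hmkempty2 : (PySem.Dict.mk [] : PySem.Dict Int Int) = PySem.Dict.empty := rfl
  set key : Int → Int := fun i => PySem.List.pyGetD comp i 0 with hkey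
  set bfs : Int → Int := fun i => pvBfsB g fu i with hbfs
  -- both dicts as pair-list modify-folds
  have hD1 : pvGroupsB is comp PySem.Dict.empty
      = (is.map (fun i => (key i, i))).foldl
          (fun d p => d.modify p.1 [] (· ++ [p.2])) PySem.Dict.empty := by
    rw [pvGroupsB_as_fold]
  have hD2 : is.foldl
        (fun (d : PySem.Dict Int Int) i =>
          let c := key i
          d.insert c (max (d.getD c 0) (bfs i))) PySem.Dict.empty
      = (is.map (fun i => (key i, bfs i))).foldl
          (fun d p => d.modify p.1 0 (fun o => max o p.2)) PySem.Dict.empty := by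
    rw [List.foldl_map]
    rfl
  rw [hmkempty, hmkempty2, hD1, hD2]
  set L1 : List (Int × Int) := is.map (fun i => (key i, i)) with hL1
  set L2 : List (Int × Int) := is.map (fun i => (key i, bfs i)) with hL2
  set d1 := L1.foldl (fun d p => d.modify p.1 [] (· ++ [p.2])) (PySem.Dict.empty) with hd1
  set d2 := L2.foldl (fun d p => d.modify p.1 0 (fun o => max o p.2)) (PySem.Dict.empty) with hd2
  have hk1 : d1.keys = PySem.Set.ofList (is.map key) := by
    rw [hd1, hL1, PySem.Dict.keys_foldl_modify_key L1, PySem.Dict.keys_empty,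
      PySem.Set.update_nil_left, hL1, List.map_map]
    rfl
  have hk2 : d2.keys = PySem.Set.ofList (is.map key) := by
    rw [hd2, hL2, PySem.Dict.keys_foldl_modify_key L2, PySem.Dict.keys_empty,
      PySem.Set.update_nil_left, hL2, List.map_map]
    rfl
  have hnd1 : d1.keys.Nodup := by
    rw [hd1]
    exact PySem.Dict.nodup_keys_foldl_modify_key _ _ _ _ _ (by simp [PySem.Dict.keys_empty])
  have hnd2 : d2.keys.Nodup := by
    rw [hd2]
    exact PySem.Dict.nodup_keys_foldl_modify_key _ _ _ _ _ (by simp [PySem.Dict.keys_empty])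
  have hv1 := PySem.Dict.values_eq_map_keys d1 hnd1 []
  have hv2 := PySem.Dict.values_eq_map_keys d2 hnd2 0
  rw [PySem.List.foldl_add _ _ 0, hv1, hv2, List.map_map, hk1, hk2]
  rw [Int.zero_add]
  congr 1
  apply List.map_congr_left
  intro k hk
  have hkmem : k ∈ is.map key := (PySem.Set.mem_ofList _ _).1 hk
  obtain ⟨i0, hi0, hki⟩ := List.mem_map.1 hkmem
  -- the group list for key k
  have hg1 : d1.getD k [] = is.filter (fun i => key i == k) := by
    rw [hd1, PySem.Dict.getD_foldl_modify_append, PySem.Dict.getD_empty, List.nil_append,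
      hL1, List.filter_map, List.map_map]
    have : ((fun p : Int × Int => p.2) ∘ fun i => (key i, i)) = id := rfl
    rw [this, List.map_id]
    rfl
  have hg2 : d2.getD k 0 = ((is.filter (fun i => key i == k)).map bfs).foldl max 0 := by
    rw [hd2, pvGetD_foldl_modify_max, PySem.Dict.getD_empty, hL2, List.filter_map, List.map_map]
    rfl
  have hS : is.filter (fun i => key i == k) ≠ [] := by
    intro hnil
    have : i0 ∈ is.filter (fun i => key i == k) :=
      List.mem_filter.2 ⟨hi0, by simp [hki]⟩
    rw [hnil] at this
    simp at this
  rw [Function.comp_apply, hg1, hg2]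
  rcases hSc : is.filter (fun i => key i == k) with _ | ⟨x, t⟩
  · exact absurd hSc hS
  · simp only [List.map_cons, List.foldl_cons]
    rw [PySem.List.max?_id_cons, Option.getD_some]
    have hx1 : 1 ≤ bfs x := one_le_pvBfsB g fu x hfu
    rw [max_eq_right (by omega : (0 : Int) ≤ bfs x)]

-- ---- shared bfs lemmas (queue-with-counter ≡ frontier lists)
lemma pvNeiFold_prepend (neis : List Int) :
    ∀ (xs ys : List Int) (vis : PySem.Set Int),
    neis.foldl (fun (acc : List Int × PySem.Set Int) nei =>
        if acc.2.contains nei then acc else (acc.1 ++ [nei], acc.2.add nei)) (xs ++ ys, vis)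
      = (xs ++ (neis.foldl (fun (acc : List Int × PySem.Set Int) nei =>
          if acc.2.contains nei then acc else (acc.1 ++ [nei], acc.2.add nei)) (ys, vis)).1,
         (neis.foldl (fun (acc : List Int × PySem.Set Int) nei =>
          if acc.2.contains nei then acc else (acc.1 ++ [nei], acc.2.add nei)) (ys, vis)).2) := by
  induction neis with
  | nil => simp
  | cons nei rest ih =>
    intro xs ys vis
    simp only [List.foldl_cons]
    by_cases hc : vis.contains nei
    · simp only [hc, if_true]; exact ih xs ys vis
    · simp only [hc, List.append_assoc]
      exact ih xs (ys ++ [nei]) (vis.add nei)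

lemma pvBfsInner_eq (g : List (List Int)) :
    ∀ (front pending : List Int) (vis : PySem.Set Int),
    pvBfsInnerA g front.length (front ++ pending) vis
      = front.foldl (fun acc node =>
          (PySem.List.pyGetD g node []).foldl
            (fun (acc : List Int × PySem.Set Int) nei =>
              if acc.2.contains nei then acc else (acc.1 ++ [nei], acc.2.add nei)) acc)
          (pending, vis) := by
  intro front
  induction front with
  | nil => intro pending vis; simp [pvBfsInnerA]
  | cons node front' ih =>
    intro pending vis
    simp only [List.length_cons, List.cons_append, pvBfsInnerA, List.foldl_cons]
    rw [pvNeiFold_prepend]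
    exact ih _ _

lemma pvBfs_eq (g : List (List Int)) :
    ∀ (fuel : Nat) (q : List Int) (vis : PySem.Set Int) (level : Int),
    pvBfsOuterA g fuel q vis level = pvBfsLoopB g fuel q vis level := by
  intro fuel
  induction fuel with
  | zero => intro q vis level; simp [pvBfsOuterA, pvBfsLoopB]
  | succ f ih =>
    intro q vis level
    simp only [pvBfsOuterA, pvBfsLoopB]
    by_cases hq : q.isEmpty
    · simp [hq]
    · have : pvBfsInnerA g q.length q vis = pvBfsStepB g q vis := by
        have := pvBfsInner_eq g q [] vis
        simpa [pvBfsStepB] using this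
      simp only [hq, this]
      exact ih _ _ _

lemma pvBfsAB (g : List (List Int)) (fuel : Nat) (src : Int) :
    pvBfsA g fuel src = pvBfsB g fuel src := by
  simp [pvBfsA, pvBfsB, pvBfs_eq]

-- ---- the two graph builds agree, and they build a valid adjacency list
lemma pvAppendAt_good (n' : Nat) (g : List (List Int)) (a b : Int)
    (hg : pvGoodG n' g) (ha : pvVIdx n' a) (hb : pvVIdx n' b) :
    pvGoodG n' (pvAppendAt g a b) := by
  obtain ⟨hlen, hmem⟩ := hg
  have ha' : pvVIdx g.length a := hlen ▸ ha
  have hk := pvNIdx_lt ha'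
  unfold pvAppendAt
  rw [pvSetD_valid g a _ ha', pvGetD_valid g a [] ha']
  constructor
  · simp [hlen]
  · intro l hl x hx
    rcases List.mem_or_eq_of_mem_set hl with h | h
    · exact hmem l h x hx
    · subst h
      rcases List.mem_append.1 hx with h | h
      · have : g.getD (pvNIdx g.length a) [] ∈ g := by
          rw [List.getD_eq_getElem?_getD, List.getElem?_eq_getElem hk]
          exact List.getElem_mem hk
        exact hmem _ this x h
      · simp at h; subst h; exact hlen ▸ hb

lemma pvBuild_eq (n : Int) (edges : List (List Int)) (hPre : Pre_magnificentSets n edges) :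
    pvBuildA n edges = pvBuildB n edges := by
  unfold pvBuildA pvBuildB
  apply PySem.List.foldl_congr_mem
  intro g e he
  obtain ⟨hlen2, _⟩ := hPre e he
  match e, hlen2 with
  | [u, v], _ =>
    simp [pvAppendAt, PySem.List.pyGetD, PySem.List.pyGet?, PySem.List.pyIdx?]

lemma pvBuild_good (n : Int) (edges : List (List Int)) (hPre : Pre_magnificentSets n edges) :
    pvGoodG n.toNat (pvBuildA n edges) := by
  unfold pvBuildA
  have hinit : pvGoodG n.toNat (List.replicate n.toNat ([] : List Int)) := by
    constructor
    · simp
    · intro l hl x hx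
      rw [List.eq_of_mem_replicate hl] at hx
      simp at hx
  generalize hg0 : (List.replicate n.toNat ([] : List Int)) = g0 at hinit
  clear hg0
  induction edges generalizing g0 with
  | nil => simpa using hinit
  | cons e rest ih =>
    have hPre' : Pre_magnificentSets n rest := fun e' he' => hPre e' (List.mem_cons_of_mem _ he')
    obtain ⟨hlen2, hbnd⟩ := hPre e (List.mem_cons_self ..)
    match e, hlen2 with
    | [u, v], _ =>
      have hu := hbnd u (by simp)
      have hv := hbnd v (by simp)
      have hn : (n.toNat : Int) = n := Int.toNat_of_nonneg (by omega)
      have huv : pvVIdx n.toNat (u - 1) := by constructor <;> omega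
      have hvv : pvVIdx n.toNat (v - 1) := by constructor <;> omega
      simp only [List.foldl_cons]
      exact ih hPre' _ (pvAppendAt_good _ _ _ _ (pvAppendAt_good _ _ _ _ hinit huv hvv) hvv huv)

lemma pvInv_init (n : Int) :
    pvInv n.toNat (PySem.List.pyRange 0 n 1) (List.replicate n.toNat 0)
      (List.replicate n.toNat (-1)) := by
  have hlen : (PySem.List.pyRange 0 n 1).length = n.toNat := by
    simp [PySem.List.length_pyRange_one]
  have hval : ∀ p, p < n.toNat → (PySem.List.pyRange 0 n 1).getD p 0 = (p : Int) := by
    intro p hp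
    rw [List.getD_eq_getElem?_getD, List.getElem?_eq_getElem (hlen ▸ hp)]
    rw [PySem.List.getElem_pyRange_one]
    simp
  refine ⟨hlen, by simp, by simp, ?_, ?_, ?_, ?_, ?_⟩
  · intro p hp
    rw [hval p hp]
    refine ⟨by omega, by omega, ?_⟩
    rw [Int.toNat_natCast, hval p hp]
  · intro p hp _
    refine ⟨hval p hp, ?_⟩
    rw [List.getD_eq_getElem?_getD, List.getElem?_eq_getElem (by simpa using hp)]
    simp
  · intro p hp
    rw [List.getD_eq_getElem?_getD, List.getElem?_eq_getElem (by simpa using hp)]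
    simp
  · intro p hp
    left
    rw [List.getD_eq_getElem?_getD, List.getElem?_eq_getElem (by simpa using hp)]
    simp
  · intro p hp h
    exfalso
    apply h
    rw [List.getD_eq_getElem?_getD, List.getElem?_eq_getElem (by simpa using hp)]
    simp

lemma pvRange_elt (n : Int) : ∀ i ∈ PySem.List.pyRange 0 n 1, 0 ≤ i ∧ i < (n.toNat : Int) := by
  intro i hi
  rw [PySem.List.mem_pyRange_one] at hi
  have := Int.self_le_toNat n
  omega

-- ===== VERDICT (by name: the statement is the Claim_ definition above) =====
theorem magnificentSets_spec : Claim_equal_magnificentSets := by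
  intro n edges _ hPre
  have hbuild := pvBuild_eq n edges hPre
  have hgood := pvBuild_good n edges hPre
  show magnificentSets n edges = magnificentSets_alt n edges
  simp only [magnificentSets, magnificentSets_alt]
  rw [← hbuild]
  rw [pvPaintAll_ghost]
  rcases hc : pvColorAllB (n.toNat + 2) (pvBuildA n edges) (PySem.List.pyRange 0 n 1)
      (PySem.List.pyRange 0 n 1) (List.replicate n.toNat (-1)) with ⟨⟨cc, ll⟩, flag⟩
  obtain ⟨rank1, hA, hcons⟩ := pvColorAll_spec n.toNat (n.toNat + 2) n.toNat
    (pvBuildA n edges) hgood (PySem.List.pyRange 0 n 1) (PySem.List.pyRange 0 n 1)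
    (List.replicate n.toNat 0) (List.replicate n.toNat (-1)) (pvRange_elt n)
    (pvInv_init n) cc ll flag hc
  rw [hA]
  cases flag with
  | false => simp
  | true =>
    have hinv1 := hcons rfl
    have hgr := pvGroups_spec n.toNat n.toNat (PySem.List.pyRange 0 n 1) cc
      (PySem.Dict.mk []) hinv1.1 (pvRange_elt n) hinv1.2.2.2.1
    simp only [Bool.true_eq_false, if_false, hgr]
    have hfun : pvBfsA (pvBuildA n edges) (2 * n.toNat + 2)
        = pvBfsB (pvBuildA n edges) (2 * n.toNat + 2) :=
      funext (pvBfsAB (pvBuildA n edges) (2 * n.toNat + 2))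
    rw [hfun]
    exact pvFinal_sum (pvBuildA n edges) (2 * n.toNat + 2) (by omega)
      (PySem.List.pyRange 0 n 1) cc
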